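-- pv_equiv track=rewrite | github.com/slacker525600/challenges | project-euler/40s/47.py | check
-- ===== SOURCE A (Python) =====
-- def my_distinct(aanFactors):
--   dDict = {}
--   bFail = False
--   for anFact in aanFactors:
--     for nFact in anFact:
--       #this may break, but can convert to string... slow but ... effective?
--       if dDict.get(str(nFact)) != None:
--         bFail = True
--         break
--       else:
--         dDict[str(nFact)] = True
--     if bFail:
--       break
--   return not bFail
--
-- nFactors = 4 #looking for example
--
-- def check(aanFactors):
--   bToReturn = True
--   for anFact in aanFactors:
--     if len(anFact) != nFactors:
--       bToReturn = False
--   if bToReturn :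
--     bToReturn = my_distinct(aanFactors)
--   return bToReturn
-- ===== SOURCE B (Python) =====
-- def check(aanFactors):
--     def distinct(xs):
--         return not xs or (xs[0] not in xs[1:] and distinct(xs[1:]))
--     flat = [str(f) for a in aanFactors for f in a]
--     return all(len(a) == 4 for a in aanFactors) and distinct(flat)
-- ===== Notes on version B (the rewrite author's own statement) =====
-- stated objective: alternative
-- what changed: Dropped A's dict and early-break flags entirely: B flattens the stringified factors once and decides distinctness by a recursive pairwise scan (head not in tail), with length checked by all() instead of a flag-carrying loop.
import Mathlib
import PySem

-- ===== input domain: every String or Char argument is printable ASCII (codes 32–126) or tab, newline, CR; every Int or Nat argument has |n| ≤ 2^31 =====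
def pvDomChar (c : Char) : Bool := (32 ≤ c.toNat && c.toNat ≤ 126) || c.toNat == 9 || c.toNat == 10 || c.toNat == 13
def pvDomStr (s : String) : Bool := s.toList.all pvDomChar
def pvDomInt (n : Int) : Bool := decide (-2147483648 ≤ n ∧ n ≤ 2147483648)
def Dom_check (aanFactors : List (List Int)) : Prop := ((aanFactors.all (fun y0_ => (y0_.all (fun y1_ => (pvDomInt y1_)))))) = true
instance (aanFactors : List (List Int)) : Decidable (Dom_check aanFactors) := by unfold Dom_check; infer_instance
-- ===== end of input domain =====

-- B drops A's dict and break flags: length via all(), distinctness via a recursive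
-- pairwise head-not-in-tail scan over the flattened stringified factors (objective: alternative).


-- ===== PORT A =====
-- inner 'for nFact in anFact' loop with its break; returns (dict, bFail)
def myDistinctInner (d : PySem.Dict String Bool) : List Int → PySem.Dict String Bool × Bool
  | [] => (d, false)
  | n :: rest =>
    if d.get? (PySem.Int.toStr n) ≠ none then (d, true)
    else myDistinctInner (d.insert (PySem.Int.toStr n) true) rest

-- outer 'for anFact in aanFactors' loop with its break; returns bFail
def myDistinctOuter (d : PySem.Dict String Bool) : List (List Int) → Bool
  | [] => false
  | a :: rest =>
    let r := myDistinctInner d a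
    if r.2 then true else myDistinctOuter r.1 rest

def my_distinct (aanFactors : List (List Int)) : Bool :=
  ! myDistinctOuter PySem.Dict.empty aanFactors

def check (aanFactors : List (List Int)) : Bool :=
  let bToReturn := aanFactors.foldl (fun b anFact => if anFact.length ≠ 4 then false else b) true
  if bToReturn then my_distinct aanFactors else bToReturn

-- ===== PORT B =====
-- Source B's recursive 'distinct': empty, or head not in tail and tail distinct
def distinctRec : List String → Bool
  | [] => true
  | x :: xs => (! xs.contains x) && distinctRec xs

def check_alt (aanFactors : List (List Int)) : Bool :=
  let flat := (aanFactors.flatMap (fun a => a)).map PySem.Int.toStr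
  aanFactors.all (fun a => a.length == 4) && distinctRec flat

-- ===== PRECONDITION & SPEC =====
def Spec_check (aanFactors : List (List Int)) (out : Bool) : Prop := out = check_alt aanFactors
instance (aanFactors : List (List Int)) (out : Bool) : Decidable (Spec_check aanFactors out) := by unfold Spec_check; infer_instance

-- ===== CLAIM (what is proved, stated in full; the proofs are below) =====
def Claim_equal_check : Prop := ∀ (aanFactors : List (List Int)), Dom_check aanFactors → Spec_check aanFactors (check aanFactors)

-- ===== LEMMAS AND PROOFS =====

-- A's length loop computes 'all lengths = 4'
theorem foldl_len (ls : List (List Int)) (b : Bool) :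
    ls.foldl (fun b anFact => if anFact.length ≠ 4 then false else b) b
      = (b && ls.all (fun a => a.length == 4)) := by
  induction ls generalizing b with
  | nil => simp
  | cons a rest ih =>
    simp only [List.foldl, List.all_cons, ih]
    by_cases h : a.length = 4 <;> simp [h]

-- B's recursive pairwise scan decides Nodup
theorem distinctRec_eq_nodup (xs : List String) :
    distinctRec xs = decide xs.Nodup := by
  induction xs with
  | nil => simp [distinctRec]
  | cons x rest ih =>
    simp [distinctRec, ih, List.nodup_cons]

-- inner loop: bFail component
theorem inner_snd (l : List Int) (d : PySem.Dict String Bool) :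
    (myDistinctInner d l).2
      = ! decide ((l.map PySem.Int.toStr).Nodup ∧ ∀ x ∈ l, PySem.Int.toStr x ∉ d.keys) := by
  induction l generalizing d with
  | nil => simp [myDistinctInner]
  | cons n rest ih =>
    by_cases h : PySem.Int.toStr n ∈ d.keys
    · have : d.get? (PySem.Int.toStr n) ≠ none := by
        simp [PySem.Dict.get?_eq_none_iff_not_mem_keys, h]
      simp [myDistinctInner, this, h]
    · have hget : d.get? (PySem.Int.toStr n) = none := by
        simp [PySem.Dict.get?_eq_none_iff_not_mem_keys, h]
      have hcon : d.contains (PySem.Int.toStr n) = false := by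
        rw [PySem.Dict.contains_eq_isSome_get?, hget]; rfl
      have hkeys := PySem.Dict.keys_insert_of_not_contains (d := d)
        (k := PySem.Int.toStr n) (v := true) hcon
      simp only [myDistinctInner, hget, ne_eq, not_true_eq_false, reduceIte]
      rw [ih, hkeys]
      congr 1
      rw [decide_eq_decide]
      simp only [List.map_cons]
      constructor
      · rintro ⟨hnd, hall⟩
        refine ⟨List.nodup_cons.mpr ⟨?_, hnd⟩, ?_⟩
        · intro hmem
          obtain ⟨y, hy, hyeq⟩ := List.mem_map.mp hmem
          exact hall y hy (List.mem_append.mpr (Or.inr (by simp [hyeq])))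
        · intro x hx
          rcases List.mem_cons.mp hx with rfl | hx'
          · exact h
          · intro hk; exact hall x hx' (List.mem_append.mpr (Or.inl hk))
      · rintro ⟨hnd, hall⟩
        obtain ⟨hn, hnd'⟩ := List.nodup_cons.mp hnd
        refine ⟨hnd', ?_⟩
        intro x hx hk
        rcases List.mem_append.mp hk with hk | hk
        · exact hall x (List.mem_cons.mpr (Or.inr hx)) hk
        · have hxe : PySem.Int.toStr x = PySem.Int.toStr n := by simpa using hk
          exact hn (by rw [← hxe]; exact List.mem_map.mpr ⟨x, hx, rfl⟩)

-- inner loop: keys on the no-fail path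
theorem inner_keys (l : List Int) (d : PySem.Dict String Bool)
    (h : (myDistinctInner d l).2 = false) :
    (myDistinctInner d l).1.keys = d.keys ++ l.map PySem.Int.toStr := by
  induction l generalizing d with
  | nil => simp [myDistinctInner]
  | cons n rest ih =>
    by_cases hg : d.get? (PySem.Int.toStr n) = none
    · have hcon : d.contains (PySem.Int.toStr n) = false := by
        rw [PySem.Dict.contains_eq_isSome_get?, hg]; rfl
      have hkeys := PySem.Dict.keys_insert_of_not_contains (d := d)
        (k := PySem.Int.toStr n) (v := true) hcon
      simp only [myDistinctInner, hg, ne_eq, not_true_eq_false, reduceIte] at h ⊢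
      rw [ih _ h, hkeys]
      simp
    · simp [myDistinctInner, hg] at h

-- outer loop characterised: fails iff the flattened stringified factors collide
-- (with themselves or with the keys already in the dict)
theorem outer_spec (ls : List (List Int)) (d : PySem.Dict String Bool) :
    myDistinctOuter d ls
      = ! decide (((ls.flatMap (fun a => a)).map PySem.Int.toStr).Nodup
                   ∧ ∀ x ∈ ls.flatMap (fun a => a), PySem.Int.toStr x ∉ d.keys) := by
  induction ls generalizing d with
  | nil => simp [myDistinctOuter]
  | cons a rest ih =>
    by_cases hf : (myDistinctInner d a).2 = true
    · have hC : decide ((a.map PySem.Int.toStr).Nodup ∧ ∀ x ∈ a, PySem.Int.toStr x ∉ d.keys)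
          = false := by
        rw [← Bool.not_not (decide _), ← inner_snd a d, hf]; rfl
      have hnot := of_decide_eq_false hC
      have hnotfull : ¬ ((((a :: rest).flatMap (fun a => a)).map PySem.Int.toStr).Nodup
          ∧ ∀ x ∈ (a :: rest).flatMap (fun a => a), PySem.Int.toStr x ∉ d.keys) := by
        rintro ⟨hnd, hall⟩
        apply hnot
        constructor
        · rw [List.flatMap_cons, List.map_append] at hnd
          exact (List.nodup_append.mp hnd).1
        · intro x hx
          exact hall x (by rw [List.flatMap_cons]; exact List.mem_append.mpr (Or.inl hx))
      simp only [myDistinctOuter, hf, if_true]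
      rw [decide_eq_false hnotfull]; rfl
    · have hf' : (myDistinctInner d a).2 = false := by simpa using hf
      have hok : (a.map PySem.Int.toStr).Nodup ∧ ∀ x ∈ a, PySem.Int.toStr x ∉ d.keys := by
        apply of_decide_eq_true
        rw [← Bool.not_not (decide _), ← inner_snd a d, hf']; rfl
      have hkeys := inner_keys a d hf'
      simp only [myDistinctOuter, hf', Bool.false_eq_true, reduceIte]
      rw [ih, hkeys]
      congr 1
      rw [decide_eq_decide]
      simp only [List.flatMap_cons, List.map_append]
      constructor
      · rintro ⟨hnd, hall⟩
        refine ⟨List.nodup_append.mpr ⟨hok.1, hnd, ?_⟩, ?_⟩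
        · intro s hs t ht heq
          obtain ⟨y, hy, rfl⟩ := List.mem_map.mp hs
          obtain ⟨z, hz, hzz⟩ := List.mem_map.mp ht
          exact hall z hz (List.mem_append.mpr (Or.inr
            (by rw [hzz, ← heq]; exact List.mem_map.mpr ⟨y, hy, rfl⟩)))
        · intro x hx
          rcases List.mem_append.mp hx with hx' | hx'
          · exact hok.2 x hx'
          · intro hk; exact hall x hx' (List.mem_append.mpr (Or.inl hk))
      · rintro ⟨hnd, hall⟩
        obtain ⟨_, hnd', hdisj⟩ := List.nodup_append.mp hnd
        refine ⟨hnd', ?_⟩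
        intro x hx hk
        rcases List.mem_append.mp hk with hk | hk
        · exact hall x (List.mem_append.mpr (Or.inr hx)) hk
        · exact hdisj (PySem.Int.toStr x) hk (PySem.Int.toStr x) (List.mem_map.mpr ⟨x, hx, rfl⟩) rfl

-- ===== VERDICT (by name: the statement is the Claim_ definition above) =====
theorem check_spec : Claim_equal_check := by
  intro aan _
  unfold Spec_check check check_alt my_distinct
  rw [foldl_len]
  simp only [distinctRec_eq_nodup, Bool.true_and]
  by_cases hall : aan.all (fun a => a.length == 4) = true
  · rw [hall]
    simp only [if_true, Bool.true_and]
    rw [outer_spec]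
    have hkeys : (PySem.Dict.empty : PySem.Dict String Bool).keys = [] := rfl
    rw [hkeys]
    simp only [List.not_mem_nil, not_false_eq_true, implies_true, and_true, Bool.not_not]
  · simp [hall]
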